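-- pv_equiv track=rewrite | github.com/ramthedevhub/color_recognition_main | color_recognition-main/src/color_recognition_api/knn_classifier.py | responseOfNeighbors
-- ===== SOURCE A (Python) =====
-- import operator
--
-- def responseOfNeighbors(neighbors):
--     all_possible_neighbors = {}
--     for x in range(len(neighbors)):
--         response = neighbors[x][-1]
--         if response in all_possible_neighbors:
--             all_possible_neighbors[response] += 1
--         else:
--             all_possible_neighbors[response] = 1
--     sortedVotes = sorted(all_possible_neighbors.items(),
--                          key=operator.itemgetter(1), reverse=True)
--
--     # Return the predicted class and the count of votes for that class
--     return sortedVotes[0][0], sortedVotes[0][1]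
-- ===== SOURCE B (Python) =====
-- import operator
--
-- def responseOfNeighbors(neighbors):
--     votes = {}
--     for row in neighbors:
--         label = row[-1]
--         votes[label] = votes.get(label, 0) + 1
--     # max over insertion order: first-inserted class wins ties,
--     # exactly like A's stable reverse sort
--     return max(votes.items(), key=operator.itemgetter(1))
-- ===== Notes on version B (the rewrite author's own statement) =====
-- stated objective: simpler
-- what changed: B counts votes with dict.get-default over the rows directly (no range/index loop, no membership branch) and picks the winner with a single max() argmax scan over the items instead of sorting them and indexing [0]; ties still go to the first-inserted class because max returns the first maximal element.
import Mathlib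
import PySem

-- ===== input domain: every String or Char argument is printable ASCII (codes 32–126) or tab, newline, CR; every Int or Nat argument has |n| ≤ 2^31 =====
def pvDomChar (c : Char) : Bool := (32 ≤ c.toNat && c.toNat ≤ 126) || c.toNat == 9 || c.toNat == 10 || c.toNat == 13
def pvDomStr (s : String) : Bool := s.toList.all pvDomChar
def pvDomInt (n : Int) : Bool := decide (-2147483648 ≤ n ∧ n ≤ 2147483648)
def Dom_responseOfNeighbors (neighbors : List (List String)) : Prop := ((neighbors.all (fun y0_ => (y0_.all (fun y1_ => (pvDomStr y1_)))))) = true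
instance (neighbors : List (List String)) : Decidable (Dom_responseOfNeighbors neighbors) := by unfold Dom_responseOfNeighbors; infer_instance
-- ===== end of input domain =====

-- B replaces A's sort-then-index-[0] winner selection by a single max() argmax scan
-- over the vote dict's items (and counts via get-default instead of a membership branch): simpler, no sort.


-- ===== PORT A =====
def responseOfNeighbors (neighbors : List (List String)) : String × Int :=
  let all_possible_neighbors : PySem.Dict String Int :=
    (PySem.List.pyRange 0 (neighbors.length : Int) 1).foldl
      (fun (d : PySem.Dict String Int) x =>
        let response := PySem.List.pyGetD (PySem.List.pyGetD neighbors x []) (-1) ""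
        if d.contains response then
          d.insert response (d.getD response 0 + 1)   -- d[response] += 1
        else
          d.insert response 1)
      PySem.Dict.empty
  let sortedVotes := PySem.List.sorted all_possible_neighbors.items (fun kv => kv.2) true
  let top := PySem.List.pyGetD sortedVotes 0 ("", 0)  -- sortedVotes[0]; Pre_ excludes the empty case (IndexError)
  (top.1, top.2)

-- ===== PORT B =====
def responseOfNeighbors_alt (neighbors : List (List String)) : String × Int :=
  let votes : PySem.Dict String Int :=
    neighbors.foldl
      (fun (d : PySem.Dict String Int) row =>
        let label := PySem.List.pyGetD row (-1) ""
        d.insert label (d.getD label 0 + 1))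
      PySem.Dict.empty
  -- max(votes.items(), key=itemgetter(1)); Pre_ excludes the empty case (ValueError)
  (PySem.List.max? votes.items (fun kv => kv.2)).getD ("", 0)

-- ===== PRECONDITION & SPEC =====
-- Pre_ excludes exactly the inputs where the Python A raises IndexError:
-- an empty neighbor list (sortedVotes[0]) or an empty row (neighbors[x][-1]).
def Pre_responseOfNeighbors (neighbors : List (List String)) : Prop :=
  neighbors ≠ [] ∧ ∀ row ∈ neighbors, row ≠ []
instance (neighbors : List (List String)) : Decidable (Pre_responseOfNeighbors neighbors) := by
  unfold Pre_responseOfNeighbors; infer_instance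
def pvWitness_responseOfNeighbors : List (List String) := [["3", "red"], ["5", "blue"], ["2", "red"]]

def Spec_responseOfNeighbors (neighbors : List (List String)) (out : String × Int) : Prop := out = responseOfNeighbors_alt neighbors
instance (neighbors : List (List String)) (out : String × Int) : Decidable (Spec_responseOfNeighbors neighbors out) := by unfold Spec_responseOfNeighbors; infer_instance

-- ===== CLAIM (what is proved, stated in full; the proofs are below) =====
def Claim_equal_responseOfNeighbors : Prop := ∀ (neighbors : List (List String)), Dom_responseOfNeighbors neighbors → Pre_responseOfNeighbors neighbors → Spec_responseOfNeighbors neighbors (responseOfNeighbors neighbors)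

-- ===== LEMMAS AND PROOFS =====

-- A's membership-branched counting step is the get-default counting step.
lemma countStep_eq (d : PySem.Dict String Int) (x : String) :
    (if d.contains x then d.insert x (d.getD x 0 + 1) else d.insert x 1)
      = d.insert x (d.getD x 0 + 1) := by
  by_cases h : d.contains x
  · simp [h]
  · have hn : d.get? x = none := (PySem.Dict.get?_eq_none_iff_contains d x).mpr (by simpa using h)
    simp [h, PySem.Dict.getD, hn]

-- B's dict is Counter of the label column.
lemma dictB_eq_counter (neighbors : List (List String)) :
    neighbors.foldl (fun (d : PySem.Dict String Int) row =>
        d.insert (PySem.List.pyGetD row (-1) "") (d.getD (PySem.List.pyGetD row (-1) "") 0 + 1))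
      PySem.Dict.empty
      = PySem.Dict.counter (neighbors.map (fun row => PySem.List.pyGetD row (-1) "")) := by
  rw [← PySem.Dict.foldl_insert_getD_add_one_eq_counter, List.foldl_map]

-- A's dict (membership-branched counting) is the same Counter.
lemma dictA_eq_counter (neighbors : List (List String)) :
    neighbors.foldl (fun (d : PySem.Dict String Int) row =>
        if d.contains (PySem.List.pyGetD row (-1) "") then
          d.insert (PySem.List.pyGetD row (-1) "") (d.getD (PySem.List.pyGetD row (-1) "") 0 + 1)
        else d.insert (PySem.List.pyGetD row (-1) "") 1)
      PySem.Dict.empty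
      = PySem.Dict.counter (neighbors.map (fun row => PySem.List.pyGetD row (-1) "")) := by
  have h : (fun (d : PySem.Dict String Int) row =>
      if d.contains (PySem.List.pyGetD row (-1) "") then
        d.insert (PySem.List.pyGetD row (-1) "") (d.getD (PySem.List.pyGetD row (-1) "") 0 + 1)
      else d.insert (PySem.List.pyGetD row (-1) "") 1)
      = fun d row => d.insert (PySem.List.pyGetD row (-1) "") (d.getD (PySem.List.pyGetD row (-1) "") 0 + 1) := by
    funext d row; exact countStep_eq d _
  rw [h, dictB_eq_counter]

-- head of insertBy (descending by key) is the strict-max step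
lemma head?_insertBy {α κ : Type} [LinearOrder κ] (key : α → κ) (x : α) (acc : List α) :
    (PySem.List.insertBy (fun a b => decide (key b < key a)) x acc).head?
      = match acc.head? with
        | none => some x
        | some h => if key h < key x then some x else some h := by
  cases acc with
  | nil => simp [PySem.List.insertBy]
  | cons h t =>
    simp only [PySem.List.insertBy, List.head?]
    split_ifs with hlt <;> simp_all

-- the first element of Python's stable reverse sort is Python's max (first maximal element)
lemma head?_sorted_rev {α κ : Type} [LinearOrder κ] (xs : List α) (key : α → κ) :
    (PySem.List.sorted xs key true).head? = PySem.List.max? xs key := by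
  rw [PySem.List.sorted_rev_eq_foldl_insertBy]
  show _ = PySem.List.max? xs key
  have aux : ∀ (ys : List α) (acc : List α),
      (ys.foldl (fun acc x => PySem.List.insertBy (fun a b => decide (key b < key a)) x acc) acc).head?
        = ys.foldl (fun m x => match m with
            | none => some x
            | some m => if key m < key x then some x else some m) acc.head? := by
    intro ys
    induction ys with
    | nil => intro acc; rfl
    | cons y ys ih =>
      intro acc
      rw [List.foldl_cons, List.foldl_cons, ih, head?_insertBy]
  rw [aux xs []]
  rfl

-- ===== VERDICT (by name: the statement is the Claim_ definition above) =====
theorem responseOfNeighbors_spec : Claim_equal_responseOfNeighbors := by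
  intro neighbors _ hpre
  obtain ⟨hne, -⟩ := hpre
  show responseOfNeighbors neighbors = responseOfNeighbors_alt neighbors
  unfold responseOfNeighbors responseOfNeighbors_alt
  simp only []
  -- turn A's range-indexed loop into a fold over the rows
  rw [PySem.List.foldl_pyRange_zero_pyGetD' neighbors []
        (fun (d : PySem.Dict String Int) row =>
          if d.contains (PySem.List.pyGetD row (-1) "") then
            d.insert (PySem.List.pyGetD row (-1) "") (d.getD (PySem.List.pyGetD row (-1) "") 0 + 1)
          else d.insert (PySem.List.pyGetD row (-1) "") 1) PySem.Dict.empty]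
  rw [dictA_eq_counter, dictB_eq_counter]
  -- the winner: first element of the stable reverse sort = Python's max over the items
  have hlne : neighbors.map (fun row => PySem.List.pyGetD row (-1) "") ≠ [] := by
    simpa using hne
  have hine : (PySem.Dict.counter (neighbors.map (fun row => PySem.List.pyGetD row (-1) ""))).items ≠ [] := by
    rw [PySem.Dict.items_counter]
    simp only [ne_eq, List.map_eq_nil_iff]
    intro hofl
    rcases List.exists_cons_of_ne_nil hlne with ⟨l, rest, hl⟩
    have : l ∈ PySem.Set.ofList (neighbors.map (fun row => PySem.List.pyGetD row (-1) "")) := by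
      rw [PySem.Set.mem_ofList, hl]; exact List.mem_cons_self
    rw [hofl] at this; exact absurd this (List.not_mem_nil)
  set items := (PySem.Dict.counter (neighbors.map (fun row => PySem.List.pyGetD row (-1) ""))).items with hitems
  obtain ⟨m, hm⟩ : ∃ m, PySem.List.max? items (fun kv => kv.2) = some m := by
    cases hmm : PySem.List.max? items (fun kv => kv.2) with
    | none => exact absurd ((PySem.List.max?_eq_none_iff items _).mp hmm) hine
    | some m => exact ⟨m, rfl⟩
  have hhead : (PySem.List.sorted items (fun kv => kv.2) true).head? = some m := by
    rw [head?_sorted_rev, hm]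
  obtain ⟨t, ht⟩ : ∃ t, PySem.List.sorted items (fun kv => kv.2) true = m :: t := by
    cases hsv : PySem.List.sorted items (fun kv => kv.2) true with
    | nil => rw [hsv] at hhead; simp at hhead
    | cons a t => rw [hsv] at hhead; simp at hhead; exact ⟨t, by rw [hhead]⟩
  rw [ht, hm, PySem.List.pyGetD_zero_cons]
  simp
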